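-- pv_equiv track=rewrite | github.com/murphytalk/cpp_notes | src/python/test.py | solution
-- ===== SOURCE A (Python) =====
-- def solution(A, B):
--     A.sort()
--     B.sort()
--
--     a = 0
--     lenA = len(A)
--     b = 0
--     lenB = len(B)
--
--     def append(array, value):
--         try:
--             if array[-1] != value:
--                 array.append(value)
--         except IndexError:
--             array.append(value)
--
--     res = []
--     while a < lenA and b < lenB:
--         if A[a] < B[b]:
--             append(res, A[a])
--             a += 1
--         elif A[a] > B[b]:
--             append(res, B[b])
--             b += 1
--         else:
--             append(res, A[a])
--             a += 1
--             b += 1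
--
--     if not (a == lenA and b == lenB):
--         if a < lenA:
--             remain = A
--             idx = a
--         else:
--             remain = B
--             idx = b
--         for c in remain[idx:]:
--             append(res, c)
--
--     return res
-- ===== SOURCE B (Python) =====
-- def solution(A, B):
--     A.sort()
--     B.sort()
--     merged = sorted(A + B)
--     res = []
--     for v in merged:
--         if not res or res[-1] != v:
--             res.append(v)
--     return res
-- ===== Notes on version B (the rewrite author's own statement) =====
-- stated objective: simpler
-- what changed: Replaces A's fused two-pointer merge-with-inline-dedup loop (plus its tail-copy branch and try/except append helper) by two plain phases: sort the concatenation, then one linear pass dropping adjacent duplicates.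
import Mathlib
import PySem

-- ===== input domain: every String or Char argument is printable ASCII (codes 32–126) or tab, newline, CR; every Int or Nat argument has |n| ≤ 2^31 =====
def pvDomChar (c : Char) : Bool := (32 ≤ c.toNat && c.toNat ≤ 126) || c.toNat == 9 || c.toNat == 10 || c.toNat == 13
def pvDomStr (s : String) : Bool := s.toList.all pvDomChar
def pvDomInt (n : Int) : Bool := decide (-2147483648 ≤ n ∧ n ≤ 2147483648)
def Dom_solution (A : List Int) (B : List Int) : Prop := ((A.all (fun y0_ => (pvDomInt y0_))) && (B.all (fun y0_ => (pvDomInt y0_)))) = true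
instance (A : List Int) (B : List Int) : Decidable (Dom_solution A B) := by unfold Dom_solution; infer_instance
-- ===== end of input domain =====

-- B replaces A's fused two-pointer merge-with-inline-dedup loop by two separate phases
-- (sort the concatenation, then one adjacent-dedup pass); objective: simpler.
-- Note: both A and B sort the argument lists in place in Python; the equivalence proved
-- here is about the return value.


-- ===== PORT A =====
-- A's inner 'append' helper: append value unless res already ends with it
-- (the try/except IndexError branch is the empty-list case, getLast? = none).
def pyAppendA (array : List Int) (value : Int) : List Int :=
  match array.getLast? with
  | some last => if last ≠ value then array ++ [value] else array
  | none => array ++ [value]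

-- A's while-loop over the two index pointers, as the obvious structural recursion
-- on the unprocessed suffixes; the two trailing cases are the 'remain[idx:]' copy loop.
def mergeLoopA : List Int → List Int → List Int → List Int
  | x :: xs, y :: ys, res =>
    if x < y then mergeLoopA xs (y :: ys) (pyAppendA res x)
    else if x > y then mergeLoopA (x :: xs) ys (pyAppendA res y)
    else mergeLoopA xs ys (pyAppendA res x)
  | xs, [], res => xs.foldl pyAppendA res
  | [], ys, res => ys.foldl pyAppendA res
termination_by xs ys _ => xs.length + ys.length

def solution (A : List Int) (B : List Int) : List Int :=
  mergeLoopA (PySem.List.sorted A (fun x => x) false) (PySem.List.sorted B (fun x => x) false) []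

-- ===== PORT B =====
-- B's dedup pass: append v only when res is empty or does not already end with v.
def dedupStepB (res : List Int) (v : Int) : List Int :=
  if res = [] ∨ res.getLast? ≠ some v then res ++ [v] else res

def solution_alt (A : List Int) (B : List Int) : List Int :=
  let sA := PySem.List.sorted A (fun x => x) false
  let sB := PySem.List.sorted B (fun x => x) false
  let merged := PySem.List.sorted (sA ++ sB) (fun x => x) false
  merged.foldl dedupStepB []

-- ===== PRECONDITION & SPEC =====
def Spec_solution (A : List Int) (B : List Int) (out : List Int) : Prop := out = solution_alt A B
instance (A : List Int) (B : List Int) (out : List Int) : Decidable (Spec_solution A B out) := by unfold Spec_solution; infer_instance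

-- ===== CLAIM (what is proved, stated in full; the proofs are below) =====
def Claim_equal_solution : Prop := ∀ (A : List Int) (B : List Int), Dom_solution A B → Spec_solution A B (solution A B)

-- ===== LEMMAS AND PROOFS =====

-- B's dedup step is extensionally A's append helper.
theorem dedupStepB_eq_pyAppendA (res : List Int) (v : Int) : dedupStepB res v = pyAppendA res v := by
  unfold dedupStepB pyAppendA
  cases h : res.getLast? with
  | none =>
    have : res = [] := List.getLast?_eq_none_iff.mp h
    simp [this]
  | some last =>
    have hne : res ≠ [] := by
      intro hnil; rw [hnil] at h; simp at h
    by_cases hv : last = v <;> simp [hne, hv]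

theorem getLast?_pyAppendA (res : List Int) (v : Int) : (pyAppendA res v).getLast? = some v := by
  unfold pyAppendA
  cases h : res.getLast? with
  | none => simp
  | some last =>
    by_cases hv : last = v <;> simp [hv, h]

theorem pyAppendA_pyAppendA_same (res : List Int) (v : Int) :
    pyAppendA (pyAppendA res v) v = pyAppendA res v := by
  conv_lhs => rw [pyAppendA]
  rw [getLast?_pyAppendA]
  simp

-- The reference merge (no dedup): what A's fused loop feeds, value by value, to append.
def mergeP : List Int → List Int → List Int
  | x :: xs, y :: ys =>
    if x < y then x :: mergeP xs (y :: ys)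
    else if x > y then y :: mergeP (x :: xs) ys
    else x :: y :: mergeP xs ys
  | xs, [] => xs
  | [], ys => ys
termination_by xs ys => xs.length + ys.length

theorem mergeLoopA_eq_foldl_mergeP : ∀ (xs ys res : List Int),
    mergeLoopA xs ys res = (mergeP xs ys).foldl pyAppendA res := by
  intro xs ys
  induction xs, ys using mergeP.induct with
  | case1 x xs y ys h ih =>
    intro res
    rw [mergeLoopA, mergeP]
    simp only [h, if_pos, List.foldl_cons]
    exact ih (pyAppendA res x)
  | case2 x xs y ys h1 h2 ih =>
    intro res
    rw [mergeLoopA, mergeP]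
    simp only [h1, h2, if_pos]
    exact ih (pyAppendA res y)
  | case3 x xs y ys h1 h2 ih =>
    intro res
    have hxy : x = y := le_antisymm (not_lt.mp h2) (not_lt.mp h1)
    rw [mergeLoopA, mergeP, if_neg h1, if_neg h2, if_neg h1, if_neg h2]
    rw [List.foldl_cons, List.foldl_cons, ← hxy, pyAppendA_pyAppendA_same]
    exact ih (pyAppendA res x)
  | case4 xs =>
    intro res
    cases xs <;> simp [mergeLoopA, mergeP]
  | case5 ys h =>
    intro res
    cases ys with
    | nil => exact absurd rfl h
    | cons y ys => simp [mergeLoopA, mergeP]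

theorem mergeP_perm : ∀ (xs ys : List Int), (mergeP xs ys).Perm (xs ++ ys) := by
  intro xs ys
  induction xs, ys using mergeP.induct with
  | case1 x xs y ys h ih =>
    rw [mergeP]; simp only [h, if_pos]
    simpa using ih.cons x
  | case2 x xs y ys h1 h2 ih =>
    rw [mergeP, if_neg h1, if_pos h2]
    have step1 : (y :: mergeP (x :: xs) ys).Perm (y :: (x :: xs ++ ys)) := ih.cons y
    have step2 : ((x :: xs) ++ y :: ys).Perm (y :: (x :: xs ++ ys)) :=
      List.perm_middle (a := y) (l₁ := x :: xs) (l₂ := ys)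
    exact step1.trans step2.symm
  | case3 x xs y ys h1 h2 ih =>
    rw [mergeP, if_neg h1, if_neg h2]
    have step1 : (x :: y :: mergeP xs ys).Perm (x :: y :: (xs ++ ys)) := (ih.cons y).cons x
    have step2 : (xs ++ y :: ys).Perm (y :: (xs ++ ys)) :=
      List.perm_middle (a := y) (l₁ := xs) (l₂ := ys)
    exact step1.trans (step2.symm.cons x)
  | case4 xs =>
    cases xs <;> simp [mergeP]
  | case5 ys h =>
    cases ys with
    | nil => exact absurd rfl h
    | cons y ys => simp [mergeP]

theorem mem_mergeP (z : Int) (xs ys : List Int) : z ∈ mergeP xs ys ↔ z ∈ xs ∨ z ∈ ys := by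
  rw [(mergeP_perm xs ys).mem_iff]
  simp

theorem mergeP_pairwise : ∀ (xs ys : List Int),
    xs.Pairwise (· ≤ ·) → ys.Pairwise (· ≤ ·) → (mergeP xs ys).Pairwise (· ≤ ·) := by
  intro xs ys
  induction xs, ys using mergeP.induct with
  | case1 x xs y ys h ih =>
    intro hx hy
    rw [mergeP]; simp only [h, if_pos]
    refine List.pairwise_cons.mpr ⟨?_, ih (List.pairwise_cons.mp hx).2 hy⟩
    intro b hb
    rcases (mem_mergeP b xs (y :: ys)).mp hb with hbx | hby
    · exact (List.pairwise_cons.mp hx).1 b hbx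
    · rcases hby with _ | hby
      · exact le_of_lt h
      · exact le_trans (le_of_lt h) ((List.pairwise_cons.mp hy).1 b (by assumption))
  | case2 x xs y ys h1 h2 ih =>
    intro hx hy
    rw [mergeP]; simp only [h1, h2, if_pos]
    refine List.pairwise_cons.mpr ⟨?_, ih hx (List.pairwise_cons.mp hy).2⟩
    intro b hb
    rcases (mem_mergeP b (x :: xs) ys).mp hb with hbx | hby
    · rcases hbx with _ | hbx
      · exact le_of_lt h2
      · exact le_trans (le_of_lt h2) ((List.pairwise_cons.mp hx).1 b (by assumption))
    · exact (List.pairwise_cons.mp hy).1 b hby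
  | case3 x xs y ys h1 h2 ih =>
    intro hx hy
    have hxy : x = y := le_antisymm (not_lt.mp h2) (not_lt.mp h1)
    rw [mergeP]; simp only [h1, h2]
    have htail := ih (List.pairwise_cons.mp hx).2 (List.pairwise_cons.mp hy).2
    have hyle : ∀ b ∈ mergeP xs ys, y ≤ b := by
      intro b hb
      rcases (mem_mergeP b xs ys).mp hb with hbx | hby
      · exact hxy ▸ (List.pairwise_cons.mp hx).1 b hbx
      · exact (List.pairwise_cons.mp hy).1 b hby
    refine List.pairwise_cons.mpr ⟨?_, List.pairwise_cons.mpr ⟨hyle, htail⟩⟩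
    intro b hb
    rcases hb with _ | hb
    · exact le_of_eq hxy
    · exact hxy ▸ hyle b (by assumption)
  | case4 xs =>
    intro hx _
    cases xs <;> simpa [mergeP] using hx
  | case5 ys h =>
    intro _ hy
    cases ys with
    | nil => exact absurd rfl h
    | cons y ys => simp [mergeP] at hy ⊢; exact hy

theorem sorted_append_eq_mergeP (xs ys : List Int)
    (hx : xs.Pairwise (· ≤ ·)) (hy : ys.Pairwise (· ≤ ·)) :
    PySem.List.sorted (xs ++ ys) (fun x => x) false = mergeP xs ys :=
  PySem.List.sorted_id_eq_of_perm_of_pairwise (xs ++ ys) (mergeP xs ys) (mergeP_perm xs ys) (mergeP_pairwise xs ys hx hy)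

-- ===== VERDICT (by name: the statement is the Claim_ definition above) =====
theorem solution_spec : Claim_equal_solution := by
  intro A B _
  show solution A B = solution_alt A B
  unfold solution
  show _ = List.foldl dedupStepB []
      (PySem.List.sorted ((PySem.List.sorted A (fun x => x) false) ++ (PySem.List.sorted B (fun x => x) false)) (fun x => x) false)
  rw [sorted_append_eq_mergeP _ _ (PySem.List.sorted_pairwise A (fun x => x)) (PySem.List.sorted_pairwise B (fun x => x))]
  rw [mergeLoopA_eq_foldl_mergeP]
  have hfun : dedupStepB = pyAppendA := funext fun res => funext fun v => dedupStepB_eq_pyAppendA res v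
  rw [hfun]
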